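-- pv_equiv track=rewrite | github.com/oZwZo/UTR_VAE | models/extract_ss.py | find_co_closing_pair
-- ===== SOURCE A (Python) =====
-- def detect_hairpin(closing_pairs):
--     head_closing_pair,tail_closing_pair = closing_pairs
--
--     # ((34, 29), (29, 34))
--     if (head_closing_pair == tail_closing_pair) | (head_closing_pair == tail_closing_pair[::-1]):
--         is_hairpin = True
--     else:
--         is_hairpin = False
--
--     return is_hairpin
--
-- def find_co_closing_pair(closing_pairs_ls):
--     """
--     find out the loops block that with shared closing pair
--     """
--     hairpin_loc = [detect_hairpin(cps) for cps in  closing_pairs_ls]   # cps: closing pairs ((xx,ww),(zz,ee))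
--
--     co_closing_index_ls= []
--     for i,cps in enumerate(closing_pairs_ls):
--         co_closing_of_i = [i]
--
--         for j,matching_cps in enumerate(closing_pairs_ls):
--
--             if i == j:
--                 continue
--
--             head_i , tail_i = matching_cps
--             if (head_i in cps) | (head_i[::-1] in cps) | (tail_i in cps) | (tail_i[::-1] in cps):
--                     co_closing_of_i.append(j)
--
--         co_closing_index_ls.append(co_closing_of_i)
--     return co_closing_index_ls
-- ===== SOURCE B (Python) =====
-- def _norm(x):
--     t = tuple(x)
--     r = t[::-1]
--     return t if t <= r else r
--
-- def _merge(a, b):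
--     out = []
--     i = j = 0
--     while i < len(a) and j < len(b):
--         if a[i] < b[j]:
--             out.append(a[i]); i += 1
--         elif b[j] < a[i]:
--             out.append(b[j]); j += 1
--         else:
--             out.append(a[i]); i += 1; j += 1
--     out.extend(a[i:])
--     out.extend(b[j:])
--     return out
--
-- def find_co_closing_pair(closing_pairs_ls):
--     # one pass: bucket indices by the normalized (reversal-invariant) key of each pair half
--     buckets = {}
--     keys = []
--     for i, (head, tail) in enumerate(closing_pairs_ls):
--         k1 = _norm(head)
--         k2 = _norm(tail)
--         ks = [k1] if k1 == k2 else [k1, k2]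
--         keys.append(ks)
--         for k in ks:
--             buckets[k] = buckets.get(k, []) + [i]
--     result = []
--     for i, ks in enumerate(keys):
--         merged = []
--         for k in ks:
--             merged = _merge(merged, buckets[k])
--         result.append([i] + [j for j in merged if j != i])
--     return result
-- ===== Notes on version B (the rewrite author's own statement) =====
-- stated objective: faster
-- what changed: Replaces A's all-pairs double scan with a single pass that buckets indices in a dict keyed by the reversal-invariant normalization of each pair half, then builds each group by merging the (sorted) buckets of its two keys.
import Mathlib
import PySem

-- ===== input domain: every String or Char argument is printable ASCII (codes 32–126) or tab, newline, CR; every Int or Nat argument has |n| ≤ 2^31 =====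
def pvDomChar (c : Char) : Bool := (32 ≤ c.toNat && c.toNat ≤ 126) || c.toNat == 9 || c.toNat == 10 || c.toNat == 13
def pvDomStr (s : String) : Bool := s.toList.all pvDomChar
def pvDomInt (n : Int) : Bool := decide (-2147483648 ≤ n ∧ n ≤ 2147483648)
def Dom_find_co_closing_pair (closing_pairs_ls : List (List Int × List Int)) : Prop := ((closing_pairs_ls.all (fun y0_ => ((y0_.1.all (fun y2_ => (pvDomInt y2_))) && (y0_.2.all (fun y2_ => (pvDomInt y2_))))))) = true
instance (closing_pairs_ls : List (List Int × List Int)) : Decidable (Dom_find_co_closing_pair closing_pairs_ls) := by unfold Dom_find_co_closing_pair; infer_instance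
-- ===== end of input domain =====

-- B replaces A's quadratic all-pairs matching by one dict pass bucketing indices
-- under a reversal-invariant key of each pair half, then merges buckets per index.

-- ===== PORT A =====
-- [::-1] on a list is ported as List.reverse (exact for Python list reversal)
def detect_hairpin (closing_pairs : List Int × List Int) : Bool :=
  let head := closing_pairs.1
  let tail := closing_pairs.2
  if (head == tail) || (head == tail.reverse) then true else false

def find_co_closing_pair (closing_pairs_ls : List (List Int × List Int)) : List (List Int) :=
  let _hairpin_loc := closing_pairs_ls.map (fun cps => detect_hairpin cps)
  (PySem.List.enumerate closing_pairs_ls 0).foldl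
    (fun acc p =>
      let i := p.1
      let cps := p.2
      let row := (PySem.List.enumerate closing_pairs_ls 0).foldl
        (fun row q =>
          let j := q.1
          let m := q.2
          if i == j then row
          else if (m.1 == cps.1 || m.1 == cps.2) || (m.1.reverse == cps.1 || m.1.reverse == cps.2)
                  || (m.2 == cps.1 || m.2 == cps.2) || (m.2.reverse == cps.1 || m.2.reverse == cps.2)
          then row ++ [j] else row) [i]
      acc ++ [row]) []

-- ===== PORT B =====
-- Python tuple '<=' comparison, lexicographic on Int lists
def lexLe : List Int → List Int → Bool
  | [], _ => true
  | _ :: _, [] => false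
  | a :: as, b :: bs => if a < b then true else if b < a then false else lexLe as bs

def pvNorm (x : List Int) : List Int :=
  let r := x.reverse
  if lexLe x r then x else r

def pvMerge : List Int → List Int → List Int
  | [], b => b
  | x :: xs, [] => x :: xs
  | x :: xs, y :: ys =>
    if x < y then x :: pvMerge xs (y :: ys)
    else if y < x then y :: pvMerge (x :: xs) ys
    else x :: pvMerge xs ys
termination_by a b => a.length + b.length

def pvKeys (p : List Int × List Int) : List (List Int) :=
  let k1 := pvNorm p.1
  let k2 := pvNorm p.2
  if k1 == k2 then [k1] else [k1, k2]

def find_co_closing_pair_alt (closing_pairs_ls : List (List Int × List Int)) : List (List Int) :=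
  let built := (PySem.List.enumerate closing_pairs_ls 0).foldl
    (fun (st : PySem.Dict (List Int) (List Int) × List (List (List Int))) p =>
      let ks := pvKeys p.2
      (ks.foldl (fun d k => d.insert k (d.getD k [] ++ [p.1])) st.1, st.2 ++ [ks]))
    (PySem.Dict.empty, [])
  let buckets := built.1
  let keys := built.2
  (PySem.List.enumerate keys 0).foldl
    (fun acc q =>
      let merged := q.2.foldl (fun m k => pvMerge m (buckets.getD k [])) []
      acc ++ [q.1 :: merged.filter (fun j => j != q.1)]) []

-- ===== PRECONDITION & SPEC =====
def Spec_find_co_closing_pair (closing_pairs_ls : List (List Int × List Int)) (out : List (List Int)) : Prop := out = find_co_closing_pair_alt closing_pairs_ls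
instance (closing_pairs_ls : List (List Int × List Int)) (out : List (List Int)) : Decidable (Spec_find_co_closing_pair closing_pairs_ls out) := by unfold Spec_find_co_closing_pair; infer_instance

-- ===== CLAIM (what is proved, stated in full; the proofs are below) =====
def Claim_equal_find_co_closing_pair : Prop := ∀ (closing_pairs_ls : List (List Int × List Int)), Dom_find_co_closing_pair closing_pairs_ls → Spec_find_co_closing_pair closing_pairs_ls (find_co_closing_pair closing_pairs_ls)

-- ===== LEMMAS AND PROOFS =====

theorem lexLe_total (a b : List Int) : lexLe a b = true ∨ lexLe b a = true := by
  induction a generalizing b with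
  | nil => left; rfl
  | cons x xs ih =>
    cases b with
    | nil => right; rfl
    | cons y ys =>
      simp only [lexLe]
      rcases lt_trichotomy x y with h | h | h
      · left; simp [h]
      · subst h; simpa [lt_irrefl] using ih ys
      · right; simp [h]

theorem lexLe_antisymm (a b : List Int) (h1 : lexLe a b = true) (h2 : lexLe b a = true) : a = b := by
  induction a generalizing b with
  | nil => cases b with
    | nil => rfl
    | cons y ys => simp [lexLe] at h2
  | cons x xs ih =>
    cases b with
    | nil => simp [lexLe] at h1
    | cons y ys =>
      simp only [lexLe] at h1 h2
      rcases lt_trichotomy x y with h | h | h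
      · rw [if_pos h] at h2; exact absurd (of_decide_eq_true h2) (lt_asymm h)
      · subst h
        simp only [lt_irrefl, if_false] at h1 h2
        exact congrArg (x :: ·) (ih ys h1 h2)
      · rw [if_pos h] at h1; exact absurd (of_decide_eq_true h1) (lt_asymm h)

theorem pvNorm_cases (x : List Int) : pvNorm x = x ∨ pvNorm x = x.reverse := by
  unfold pvNorm
  by_cases h : lexLe x x.reverse = true <;> simp [h]

theorem pvNorm_reverse (x : List Int) : pvNorm x.reverse = pvNorm x := by
  unfold pvNorm
  simp only [List.reverse_reverse]
  rcases lexLe_total x x.reverse with h | h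
  · simp only [h, if_true]
    split
    · rename_i h2; exact lexLe_antisymm _ _ h2 h
    · rfl
  · simp only [h, if_true]
    split
    · rename_i h2; exact (lexLe_antisymm _ _ h2 h).symm
    · rfl

theorem pvNorm_eq_iff (x y : List Int) : pvNorm x = pvNorm y ↔ (x = y ∨ x.reverse = y) := by
  constructor
  · intro h
    rcases pvNorm_cases x with hx | hx <;> rcases pvNorm_cases y with hy | hy <;>
      rw [hx, hy] at h
    · exact Or.inl h
    · exact Or.inr (by rw [h, List.reverse_reverse])
    · exact Or.inr h
    · exact Or.inl (by simpa using congrArg List.reverse h)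
  · rintro (rfl | h)
    · rfl
    · rw [← h, pvNorm_reverse]

theorem pvMerge_mem (a b : List Int) (x : Int) : x ∈ pvMerge a b ↔ x ∈ a ∨ x ∈ b := by
  fun_induction pvMerge a b with
  | case1 => simp
  | case2 => simp
  | case3 p q r s h ih => simp [ih]; tauto
  | case4 p q r s h h' ih => simp [ih]; tauto
  | case5 p q r s h h' ih =>
    have : p = r := le_antisymm (not_lt.1 h') (not_lt.1 h)
    subst this
    simp [ih]; tauto

theorem pvMerge_pairwise (a b : List Int) (ha : a.Pairwise (· < ·)) (hb : b.Pairwise (· < ·)) :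
    (pvMerge a b).Pairwise (· < ·) := by
  fun_induction pvMerge a b with
  | case1 => exact hb
  | case2 => exact ha
  | case3 p q r s h ih =>
    rw [List.pairwise_cons] at ha ⊢
    refine ⟨?_, ih ha.2 hb⟩
    intro z hz
    rcases (pvMerge_mem _ _ _).1 hz with hz | hz
    · exact ha.1 z hz
    · rcases List.mem_cons.1 hz with rfl | hz
      · exact h
      · rw [List.pairwise_cons] at hb
        exact h.trans (hb.1 z hz)
  | case4 p q r s h h' ih =>
    rw [List.pairwise_cons] at hb ⊢
    refine ⟨?_, ih ha hb.2⟩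
    intro z hz
    rcases (pvMerge_mem _ _ _).1 hz with hz | hz
    · rcases List.mem_cons.1 hz with rfl | hz
      · exact h'
      · rw [List.pairwise_cons] at ha
        exact h'.trans (ha.1 z hz)
    · exact hb.1 z hz
  | case5 p q r s h h' ih =>
    have hpr : p = r := le_antisymm (not_lt.1 h') (not_lt.1 h)
    subst hpr
    rw [List.pairwise_cons] at ha hb ⊢
    refine ⟨?_, ih ha.2 hb.2⟩
    intro z hz
    rcases (pvMerge_mem _ _ _).1 hz with hz | hz
    · exact ha.1 z hz
    · exact hb.1 z hz

-- the reference content of bucket k: indices (from start s) whose pair has key k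
def bucketSpec (ls : List (List Int × List Int)) (s : Int) (k : List Int) : List Int :=
  ((PySem.List.enumerate ls s).filter (fun p => decide (k ∈ pvKeys p.2))).map (·.1)

theorem mem_bucketSpec (ls : List (List Int × List Int)) (s : Int) (k : List Int) (j : Int) :
    j ∈ bucketSpec ls s k ↔ ∃ (t : Nat) (h : t < ls.length), j = s + t ∧ k ∈ pvKeys ls[t] := by
  unfold bucketSpec
  simp only [List.mem_map, List.mem_filter, PySem.List.mem_enumerate_iff]
  constructor
  · rintro ⟨p, ⟨⟨t, ht, rfl⟩, hk⟩, rfl⟩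
    exact ⟨t, ht, rfl, by simpa using hk⟩
  · rintro ⟨t, ht, rfl, hk⟩
    exact ⟨(s + t, ls[t]), ⟨⟨t, ht, rfl⟩, by simpa using hk⟩, rfl⟩

theorem bucketSpec_pairwise (ls : List (List Int × List Int)) (s : Int) (k : List Int) :
    (bucketSpec ls s k).Pairwise (· < ·) := by
  unfold bucketSpec
  refine List.Pairwise.map _ (fun a b h => h) ?_
  exact (PySem.List.pairwise_lt_enumerate ls s).filter _

theorem bucketSpec_cons (x : List Int × List Int) (ls : List (List Int × List Int)) (s : Int) (k : List Int) :
    bucketSpec (x :: ls) s k = (if k ∈ pvKeys x then [s] else []) ++ bucketSpec ls (s + 1) k := by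
  unfold bucketSpec
  rw [PySem.List.enumerate_cons]
  simp only [List.filter_cons]
  by_cases h : k ∈ pvKeys x <;> simp [h]

theorem pvKeys_nodup (p : List Int × List Int) : (pvKeys p).Nodup := by
  unfold pvKeys
  by_cases h : pvNorm p.1 = pvNorm p.2 <;> simp [h]

-- the inner key loop appends i to exactly the buckets named in ks
theorem inner_fold_getD (ks : List (List Int)) (hnd : ks.Nodup)
    (d : PySem.Dict (List Int) (List Int)) (i : Int) (k : List Int) :
    ((ks.foldl (fun d k => d.insert k (d.getD k [] ++ [i])) d).getD k []) =
      d.getD k [] ++ (if k ∈ ks then [i] else []) := by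
  induction ks generalizing d with
  | nil => simp
  | cons a as ih =>
    rw [List.nodup_cons] at hnd
    rw [List.foldl_cons, ih hnd.2]
    by_cases hk : k = a
    · subst hk
      simp [hnd.1]
    · rw [PySem.Dict.getD_insert]
      simp [hk, List.mem_cons]

-- the building fold: second component collects the key lists, first the buckets
theorem build_fold (ls : List (List Int × List Int)) (s : Int)
    (d : PySem.Dict (List Int) (List Int)) (acc : List (List (List Int))) :
    ((PySem.List.enumerate ls s).foldl
      (fun (st : PySem.Dict (List Int) (List Int) × List (List (List Int))) p =>
        ((pvKeys p.2).foldl (fun d k => d.insert k (d.getD k [] ++ [p.1])) st.1, st.2 ++ [pvKeys p.2]))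
      (d, acc)).2 = acc ++ ls.map pvKeys ∧
    ∀ k, ((PySem.List.enumerate ls s).foldl
      (fun (st : PySem.Dict (List Int) (List Int) × List (List (List Int))) p =>
        ((pvKeys p.2).foldl (fun d k => d.insert k (d.getD k [] ++ [p.1])) st.1, st.2 ++ [pvKeys p.2]))
      (d, acc)).1.getD k [] = d.getD k [] ++ bucketSpec ls s k := by
  induction ls generalizing s d acc with
  | nil => simp [PySem.List.enumerate_nil, bucketSpec, PySem.List.enumerate_nil]
  | cons x xs ih =>
    rw [PySem.List.enumerate_cons]
    simp only [List.foldl_cons]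
    constructor
    · rw [(ih (s+1) _ _).1]
      simp
    · intro k
      rw [(ih (s+1) _ _).2 k, inner_fold_getD _ (pvKeys_nodup x) _ s k, bucketSpec_cons]
      split_ifs <;> simp

-- merged row of B: membership and sortedness
theorem merged_pairwise (buckets : PySem.Dict (List Int) (List Int)) (ks : List (List Int))
    (init : List Int) (hinit : init.Pairwise (· < ·))
    (hb : ∀ k, (buckets.getD k []).Pairwise (· < ·)) :
    (ks.foldl (fun m k => pvMerge m (buckets.getD k [])) init).Pairwise (· < ·) := by
  induction ks generalizing init with
  | nil => exact hinit
  | cons a as ih => exact ih _ (pvMerge_pairwise _ _ hinit (hb a))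

theorem merged_mem (buckets : PySem.Dict (List Int) (List Int)) (ks : List (List Int))
    (init : List Int) (j : Int) :
    j ∈ ks.foldl (fun m k => pvMerge m (buckets.getD k [])) init ↔
      j ∈ init ∨ ∃ k ∈ ks, j ∈ buckets.getD k [] := by
  induction ks generalizing init with
  | nil => simp
  | cons a as ih =>
    rw [List.foldl_cons, ih, pvMerge_mem]
    simp [List.mem_cons]
    tauto

-- strictly increasing Int lists with the same members are equal
theorem eq_of_pairwise_lt_of_mem_iff (a b : List Int) (ha : a.Pairwise (· < ·))
    (hb : b.Pairwise (· < ·)) (h : ∀ x, x ∈ a ↔ x ∈ b) : a = b := by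
  exact List.Perm.eq_of_pairwise (fun _ _ _ _ h1 h2 => absurd h2 (lt_asymm h1)) ha hb
    ((List.perm_ext_iff_of_nodup ha.nodup hb.nodup).2 h)

-- A's match condition is key-set intersection
theorem matchA_iff (m cps : List Int × List Int) :
    ((m.1 == cps.1 || m.1 == cps.2) || (m.1.reverse == cps.1 || m.1.reverse == cps.2)
      || (m.2 == cps.1 || m.2 == cps.2) || (m.2.reverse == cps.1 || m.2.reverse == cps.2)) = true ↔
    ∃ k ∈ pvKeys m, k ∈ pvKeys cps := by
  have hmem : ∀ (p : List Int × List Int) (k : List Int),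
      k ∈ pvKeys p ↔ (k = pvNorm p.1 ∨ k = pvNorm p.2) := by
    intro p k
    by_cases h : pvNorm p.1 = pvNorm p.2 <;> simp [pvKeys, h]
  have hex : (∃ k ∈ pvKeys m, k ∈ pvKeys cps) ↔
      ((pvNorm m.1 = pvNorm cps.1 ∨ pvNorm m.1 = pvNorm cps.2) ∨
       (pvNorm m.2 = pvNorm cps.1 ∨ pvNorm m.2 = pvNorm cps.2)) := by
    simp only [hmem]
    constructor
    · rintro ⟨k, hk1, hk2⟩
      rcases hk1 with rfl | rfl <;> tauto
    · rintro ((h | h) | (h | h))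
      · exact ⟨pvNorm m.1, Or.inl rfl, Or.inl h⟩
      · exact ⟨pvNorm m.1, Or.inl rfl, Or.inr h⟩
      · exact ⟨pvNorm m.2, Or.inr rfl, Or.inl h⟩
      · exact ⟨pvNorm m.2, Or.inr rfl, Or.inr h⟩
  rw [hex]
  simp only [Bool.or_eq_true, beq_iff_eq, pvNorm_eq_iff]
  tauto

theorem enumerate_map (g : (List Int × List Int) → List (List Int)) (ls : List (List Int × List Int)) (s : Int) :
    PySem.List.enumerate (ls.map g) s = (PySem.List.enumerate ls s).map (fun p => (p.1, g p.2)) := by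
  induction ls generalizing s with
  | nil => simp [PySem.List.enumerate_nil]
  | cons x xs ih => simp [PySem.List.enumerate_cons, ih]

theorem rowA_eq (ls : List (List Int × List Int)) (i : Int)
    (C : Int × (List Int × List Int) → Bool) :
    (PySem.List.enumerate ls 0).foldl
      (fun row q => if i == q.1 then row else if C q then row ++ [q.1] else row) [i] =
    [i] ++ ((PySem.List.enumerate ls 0).filter (fun q => (!(i == q.1)) && C q)).map (·.1) := by
  rw [← PySem.List.foldl_append_if]
  apply PySem.List.foldl_congr_mem
  intro acc q _
  by_cases h1 : (i == q.1) = true <;> by_cases h2 : C q = true <;> simp [h1, h2]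

theorem tails_eq (ls : List (List Int × List Int))
    (buckets : PySem.Dict (List Int) (List Int))
    (hB : ∀ k, buckets.getD k [] = bucketSpec ls 0 k)
    (i : Int) (cps : List Int × List Int)
    (C : Int × (List Int × List Int) → Bool)
    (hC : ∀ q, C q = true ↔ ∃ k ∈ pvKeys q.2, k ∈ pvKeys cps) :
    ((PySem.List.enumerate ls 0).filter (fun q => (!(i == q.1)) && C q)).map (·.1) =
    ((pvKeys cps).foldl (fun m k => pvMerge m (buckets.getD k [])) []).filter (fun j => j != i) := by
  apply eq_of_pairwise_lt_of_mem_iff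
  · refine List.Pairwise.map _ (fun a b h => h) ?_
    exact (PySem.List.pairwise_lt_enumerate ls 0).filter _
  · refine List.Pairwise.filter _ ?_
    refine merged_pairwise _ _ _ (by simp) ?_
    intro k
    rw [hB]
    exact bucketSpec_pairwise ls 0 k
  · intro x
    simp only [List.mem_map, List.mem_filter]
    constructor
    · rintro ⟨q, ⟨hqmem, hq⟩, rfl⟩
      rw [PySem.List.mem_enumerate_iff] at hqmem
      obtain ⟨t, ht, rfl⟩ := hqmem
      simp only [Bool.and_eq_true, Bool.not_eq_true', beq_eq_false_iff_ne] at hq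
      obtain ⟨k, hk1, hk2⟩ := (hC _).1 hq.2
      refine ⟨?_, ?_⟩
      · rw [merged_mem]
        right
        refine ⟨k, hk2, ?_⟩
        rw [hB, mem_bucketSpec]
        exact ⟨t, ht, rfl, hk1⟩
      · rw [bne_iff_ne]
        intro h
        exact hq.1 h.symm
    · rintro ⟨hm, hne⟩
      rw [merged_mem] at hm
      rcases hm with h | ⟨k, hk, hb⟩
      · simp at h
      · rw [hB, mem_bucketSpec] at hb
        obtain ⟨t, ht, rfl, hkt⟩ := hb
        refine ⟨((0 : Int) + t, ls[t]), ⟨?_, ?_⟩, rfl⟩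
        · rw [PySem.List.mem_enumerate_iff]
          exact ⟨t, ht, rfl⟩
        · simp only [Bool.and_eq_true, Bool.not_eq_true', beq_eq_false_iff_ne]
          refine ⟨fun h => ?_, (hC _).2 ⟨k, hkt, hk⟩⟩
          rw [bne_iff_ne] at hne
          exact hne (h ▸ rfl)

theorem main_eq (ls : List (List Int × List Int)) :
    find_co_closing_pair ls = find_co_closing_pair_alt ls := by
  unfold find_co_closing_pair find_co_closing_pair_alt
  dsimp only
  have hbuild := build_fold ls 0 PySem.Dict.empty []
  rw [hbuild.1]
  have hB : ∀ k, ((PySem.List.enumerate ls 0).foldl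
      (fun (st : PySem.Dict (List Int) (List Int) × List (List (List Int))) p =>
        ((pvKeys p.2).foldl (fun d k => d.insert k (d.getD k [] ++ [p.1])) st.1, st.2 ++ [pvKeys p.2]))
      (PySem.Dict.empty, [])).1.getD k [] = bucketSpec ls 0 k := by
    intro k
    rw [hbuild.2 k]
    simp [PySem.Dict.empty, PySem.Dict.getD, PySem.Dict.get?]
  rw [List.nil_append, enumerate_map]
  rw [PySem.List.foldl_append_singleton_eq_map, PySem.List.foldl_append_singleton_eq_map,
    List.map_map]
  apply List.map_congr_left
  intro q _
  simp only [Function.comp]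
  rw [rowA_eq ls q.1 (fun r =>
      (r.2.1 == q.2.1 || r.2.1 == q.2.2) || (r.2.1.reverse == q.2.1 || r.2.1.reverse == q.2.2)
      || (r.2.2 == q.2.1 || r.2.2 == q.2.2) || (r.2.2.reverse == q.2.1 || r.2.2.reverse == q.2.2))]
  rw [List.singleton_append]
  congr 1
  rw [tails_eq ls _ hB q.1 q.2 _ (fun r => matchA_iff r.2 q.2)]

theorem find_co_closing_pair_spec : Claim_equal_find_co_closing_pair := by
  intro ls _
  exact main_eq ls
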